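-- pv_equiv track=rewrite | github.com/TimePPT/AgentSkills | skills/docs-sor-maintainer/scripts/doc_topology.py | _compute_navigation_reachability
-- ===== SOURCE A (Python) =====
-- from collections import deque
--
-- def _compute_navigation_reachability(
--     root_path: str,
--     adjacency: dict[str, set[str]],
-- ) -> set[str]:
--     reachable: set[str] = set()
--     queue: deque[str] = deque([root_path])
--
--     while queue:
--         current = queue.popleft()
--         if current in reachable:
--             continue
--         reachable.add(current)
--         for target in sorted(adjacency.get(current, set())):
--             if target not in reachable:
--                 queue.append(target)
--     return reachable
-- ===== SOURCE B (Python) =====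
-- def _compute_navigation_reachability(
--     root_path: str,
--     adjacency: dict[str, set[str]],
-- ) -> set[str]:
--     # Naive fixed-point iteration instead of a BFS queue: repeatedly sweep the
--     # whole reachable set, collecting every outgoing target not yet reached,
--     # and add them in bulk; stop when a sweep discovers nothing new.
--     # (The set-iteration order only affects unobservable internals: the
--     # returned value is a set, identical regardless of sweep order.)
--     reachable: set[str] = {root_path}
--     while True:
--         additions = [
--             target
--             for node in reachable
--             for target in sorted(adjacency.get(node, set()))
--             if target not in reachable
--         ]
--         if not additions:
--             break
--         reachable.update(additions)
--     return reachable
-- ===== Notes on version B (the rewrite author's own statement) =====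
-- stated objective: alternative
-- what changed: A's deque-based BFS (pop one node at a time, skip visited, enqueue its unseen sorted targets) is replaced by a naive fixed-point iteration: repeatedly sweep the entire reachable set collecting all not-yet-reached targets and add them in bulk, stopping when a sweep adds nothing; there is no queue, no frontier and no per-node visit order.
import Mathlib
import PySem

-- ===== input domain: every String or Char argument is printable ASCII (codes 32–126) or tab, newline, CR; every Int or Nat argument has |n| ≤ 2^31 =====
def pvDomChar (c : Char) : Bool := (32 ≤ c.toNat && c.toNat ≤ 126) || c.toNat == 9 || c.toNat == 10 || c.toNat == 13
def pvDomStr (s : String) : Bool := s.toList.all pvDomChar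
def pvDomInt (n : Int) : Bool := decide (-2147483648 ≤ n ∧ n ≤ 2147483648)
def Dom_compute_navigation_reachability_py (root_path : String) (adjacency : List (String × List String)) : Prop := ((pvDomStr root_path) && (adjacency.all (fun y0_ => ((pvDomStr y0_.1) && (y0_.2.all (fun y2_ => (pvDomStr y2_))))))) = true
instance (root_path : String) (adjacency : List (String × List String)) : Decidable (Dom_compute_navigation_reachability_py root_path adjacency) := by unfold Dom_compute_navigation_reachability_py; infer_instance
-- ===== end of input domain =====

-- B replaces A's deque-based BFS by a naive fixed-point iteration (bulk sweeps of the
-- whole reachable set until a sweep adds nothing); objective: alternative. Return value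
-- only — neither program mutates its arguments. The Python result is a set; the ports
-- represent it as the insertion-order list of its distinct elements.

-- Shared helpers for what BOTH Pythons write identically: 'adjacency.get(current, set())'
-- (assoc-list lookup, first match, default empty set) and 'sorted(...)'.
def pvGetD (adj : List (String × List String)) (k : String) : List String :=
  match adj with
  | [] => []
  | (a, b) :: t => if a = k then b else pvGetD t k

def pvTgts (adj : List (String × List String)) (c : String) : List String :=
  PySem.List.sorted (pvGetD adj c) (fun x => x) false

-- The node universe used only as a termination bound (a totality guard, not part of the algorithm).
def pvUniv (root : String) (adj : List (String × List String)) : List String :=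
  root :: adj.flatMap (fun p => p.1 :: p.2)

-- A's enqueue for-loop, as BOTH its def and its characterisation.
def pvEnq (r' q' tgts : List String) : List String :=
  tgts.foldl (fun acc t => if t ∉ r' then acc ++ [t] else acc) q'

lemma pvEnq_eq (r' q' tgts : List String) : pvEnq r' q' tgts = q' ++ tgts.filter (fun t => t ∉ r') := by
  rw [pvEnq, PySem.List.foldl_append_ite_eq_filter]

lemma pvTgts_mem_univ (root : String) (adj : List (String × List String)) :
    ∀ c, ∀ x ∈ pvTgts adj c, x ∈ pvUniv root adj := by
  intro c x hx
  rw [pvTgts, PySem.List.mem_sorted] at hx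
  rw [pvUniv]
  refine List.mem_cons_of_mem _ ?_
  induction adj with
  | nil => simp [pvGetD] at hx
  | cons h t ih =>
    rw [pvGetD] at hx
    by_cases hc : h.1 = c
    · rw [if_pos hc] at hx
      simp only [List.flatMap_cons, List.mem_append]
      left; exact List.mem_cons_of_mem _ hx
    · rw [if_neg hc] at hx
      simp only [List.flatMap_cons, List.mem_append]
      right; exact ih hx

lemma pvTgts_len_le (adj : List (String × List String)) :
    ∀ c, (pvTgts adj c).length ≤ (adj.flatMap (fun p => p.2)).length := by
  intro c
  rw [pvTgts, PySem.List.length_sorted]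
  induction adj with
  | nil => simp [pvGetD]
  | cons h t ih =>
    rw [pvGetD]
    by_cases hc : h.1 = c
    · rw [if_pos hc]
      simp only [List.flatMap_cons, List.length_append]
      omega
    · rw [if_neg hc]
      simp only [List.flatMap_cons, List.length_append]
      omega

-- pvDedupF s l = the elements of l not in s, first occurrences, in order
-- (cited by the ports' totality guards and by the proofs).
def pvDedupF (s l : List String) : List String :=
  match l with
  | [] => []
  | t :: l' => if t ∈ s then pvDedupF s l' else t :: pvDedupF (s ++ [t]) l'

lemma mem_pvDedupF (s l : List String) : ∀ x ∈ pvDedupF s l, x ∈ l ∧ x ∉ s := by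
  induction l generalizing s with
  | nil => simp [pvDedupF]
  | cons t l' ih =>
    intro x hx
    rw [pvDedupF] at hx
    by_cases ht : t ∈ s
    · rw [if_pos ht] at hx
      exact ⟨List.mem_cons_of_mem _ (ih s x hx).1, (ih s x hx).2⟩
    · rw [if_neg ht] at hx
      cases hx with
      | head => exact ⟨List.mem_cons_self, ht⟩
      | tail _ hx =>
        have := ih (s ++ [t]) x hx
        exact ⟨List.mem_cons_of_mem _ this.1, fun hs => this.2 (List.mem_append_left _ hs)⟩

lemma nodup_append_pvDedupF (s l : List String) (hs : s.Nodup) : (s ++ pvDedupF s l).Nodup := by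
  induction l generalizing s with
  | nil => simpa [pvDedupF]
  | cons t l' ih =>
    rw [pvDedupF]
    by_cases ht : t ∈ s
    · rw [if_pos ht]; exact ih s hs
    · rw [if_neg ht]
      have hst : (s ++ [t]).Nodup := by
        refine List.Nodup.append hs (List.nodup_singleton t) ?_
        intro a ha hb
        simp only [List.mem_singleton] at hb
        exact ht (hb ▸ ha)
      have := ih (s ++ [t]) hst
      simpa using this

-- 'reachable.update(additions)' appends the new elements, first occurrences, in order
-- (cited by pvLoopR's totality guards).
lemma pvUpdate_eq (s l : List String) : PySem.Set.update s l = s ++ pvDedupF s l := by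
  induction l generalizing s with
  | nil => simp [pvDedupF]
  | cons t l' ih =>
    rw [PySem.Set.update_cons, pvDedupF]
    by_cases ht : t ∈ s
    · rw [if_pos ht, PySem.Set.add_of_mem ht, ih]
    · rw [if_neg ht, PySem.Set.add_of_not_mem ht, ih]
      simp

-- ===== PORT A =====
-- Literal port of A's while loop; the extra arguments after q are totality guards
-- (invariants that bound the loop), not computation.
def pvLoopA (adj : List (String × List String)) (u : List String) (T : Nat)
    (r q : List String)
    (hr : r.Nodup) (hru : ∀ x ∈ r, x ∈ u) (hqu : ∀ x ∈ q, x ∈ u)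
    (hadj : ∀ c, ∀ x ∈ pvTgts adj c, x ∈ u)
    (hT : ∀ c, (pvTgts adj c).length ≤ T) : List String :=
  match q with
  | [] => r
  | c :: q' =>
    if hc : c ∈ r then
      -- 'if current in reachable: continue'
      pvLoopA adj u T r q' hr hru (fun x hx => hqu x (List.mem_cons_of_mem _ hx)) hadj hT
    else
      -- 'reachable.add(current)' then 'for target in sorted(...): if target not in reachable: queue.append(target)'
      pvLoopA adj u T (r ++ [c])
        (pvEnq (r ++ [c]) q' (pvTgts adj c))
        (by refine List.Nodup.append hr (List.nodup_singleton c) ?_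
            intro a ha hb
            simp only [List.mem_singleton] at hb
            exact hc (hb ▸ ha))
        (by intro x hx
            rcases List.mem_append.1 hx with h | h
            · exact hru x h
            · simp at h; subst h; exact hqu x List.mem_cons_self)
        (by intro x hx
            rw [pvEnq_eq] at hx
            rcases List.mem_append.1 hx with h | h
            · exact hqu x (List.mem_cons_of_mem _ h)
            · exact hadj c x (List.mem_of_mem_filter h))
        hadj hT
  termination_by (u.length + 1 - r.length) * (T + 1) + q.length
  decreasing_by
  · simp only [List.length_cons]; omega
  · rw [pvEnq_eq, List.length_append]
    have h1 : r.length + 1 ≤ u.length := by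
      have hle : (r ++ [c]).length ≤ u.length := by
        refine List.Subperm.length_le (List.subperm_of_subset ?_ ?_)
        · refine List.Nodup.append hr (List.nodup_singleton c) ?_
          intro a ha hb
          simp only [List.mem_singleton] at hb
          exact hc (hb ▸ ha)
        · intro x hx
          rcases List.mem_append.1 hx with h | h
          · exact hru x h
          · simp at h; subst h; exact hqu x List.mem_cons_self
      simpa using hle
    have h2 : ((pvTgts adj c).filter (fun t => decide (t ∉ r ++ [c]))).length ≤ T :=
      le_trans (List.length_filter_le _ _) (hT c)
    have key : ∀ a b qq f t : Nat, b + 1 ≤ a → f ≤ t →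
        (a + 1 - (b + 1)) * (t + 1) + (qq + f) < (a + 1 - b) * (t + 1) + (qq + 1) := by
      intro a b qq f t ha hf
      have e1 : a + 1 - b = (a - b - 1) + 2 := by omega
      have e2 : a + 1 - (b + 1) = (a - b - 1) + 1 := by omega
      rw [e1, e2]; nlinarith
    simp only [List.length_append, List.length_cons, List.length_nil]
    exact key u.length r.length q'.length _ T h1 h2

def compute_navigation_reachability_py (root_path : String) (adjacency : List (String × List String)) : List String :=
  pvLoopA adjacency (pvUniv root_path adjacency) ((adjacency.flatMap (fun p => p.2)).length)
    [] [root_path]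
    (List.nodup_nil) (by simp)
    (by intro x hx; simp at hx; subst hx; exact List.mem_cons_self)
    (pvTgts_mem_univ root_path adjacency) (pvTgts_len_le adjacency)

-- ===== PORT B =====
-- Literal port of B's 'while True' fixed-point loop: one sweep collects
-- 'additions' (a flat list comprehension over the whole reachable set), the loop
-- stops when it is empty and otherwise does 'reachable.update(additions)'.
-- The arguments after r are totality guards, not computation.
def pvLoopR (adj : List (String × List String)) (u : List String)
    (r : List String)
    (hr : r.Nodup) (hru : ∀ x ∈ r, x ∈ u)
    (hadj : ∀ c, ∀ x ∈ pvTgts adj c, x ∈ u) : List String :=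
  -- additions = [t for node in reachable for t in sorted(adjacency.get(node, set())) if t not in reachable]
  let additions := r.flatMap (fun node => (pvTgts adj node).filter (fun t => t ∉ r))
  if _h : additions = [] then r
  else
    pvLoopR adj u (PySem.Set.update r additions)
      (by rw [pvUpdate_eq]; exact nodup_append_pvDedupF r additions hr)
      (by rw [pvUpdate_eq]
          intro x hx
          rcases List.mem_append.1 hx with hx | hx
          · exact hru x hx
          · rcases List.mem_flatMap.1 (mem_pvDedupF r additions x hx).1 with ⟨n, _, hn⟩
            exact hadj n x (List.mem_of_mem_filter hn))
      hadj
  termination_by u.length + 1 - r.length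
  decreasing_by
    have hgrow : 1 ≤ (pvDedupF r additions).length := by
      match hadd : additions, _h with
      | a :: rest, _ =>
        have ha : a ∉ r := by
          have : a ∈ additions := by rw [hadd]; exact List.mem_cons_self
          rcases List.mem_flatMap.1 this with ⟨n, _, hn⟩
          simpa using (List.of_mem_filter hn)
        rw [pvDedupF, if_neg ha]
        simp
    have hlen : (PySem.Set.update r additions).length ≤ u.length := by
      refine List.Subperm.length_le (List.subperm_of_subset ?_ ?_)
      · rw [pvUpdate_eq]; exact nodup_append_pvDedupF r additions hr
      · rw [pvUpdate_eq]
        intro x hx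
        rcases List.mem_append.1 hx with hx | hx
        · exact hru x hx
        · rcases List.mem_flatMap.1 (mem_pvDedupF r additions x hx).1 with ⟨n, _, hn⟩
          exact hadj n x (List.mem_of_mem_filter hn)
    have hge : r.length + 1 ≤ (PySem.Set.update r additions).length := by
      rw [pvUpdate_eq, List.length_append]; omega
    show u.length + 1 - (PySem.Set.update r additions).length < u.length + 1 - r.length
    omega

def compute_navigation_reachability_py_alt (root_path : String) (adjacency : List (String × List String)) : List String :=
  pvLoopR adjacency (pvUniv root_path adjacency) [root_path]
    (List.nodup_singleton _)
    (by intro x hx; simp at hx; subst hx; exact List.mem_cons_self)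
    (pvTgts_mem_univ root_path adjacency)

-- ===== PRECONDITION & SPEC =====
def Spec_compute_navigation_reachability_py (root_path : String) (adjacency : List (String × List String)) (out : List String) : Prop := out = compute_navigation_reachability_py_alt root_path adjacency
instance (root_path : String) (adjacency : List (String × List String)) (out : List String) : Decidable (Spec_compute_navigation_reachability_py root_path adjacency out) := by unfold Spec_compute_navigation_reachability_py; infer_instance

-- ===== CLAIM (what is proved, stated in full; the proofs are below) =====
def Claim_equal_compute_navigation_reachability_py : Prop := ∀ (root_path : String) (adjacency : List (String × List String)), Dom_compute_navigation_reachability_py root_path adjacency → Spec_compute_navigation_reachability_py root_path adjacency (compute_navigation_reachability_py root_path adjacency)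

-- ===== LEMMAS AND PROOFS =====

lemma pvDedupF_append (s l₁ l₂ : List String) :
    pvDedupF s (l₁ ++ l₂) = pvDedupF s l₁ ++ pvDedupF (s ++ pvDedupF s l₁) l₂ := by
  induction l₁ generalizing s with
  | nil => simp [pvDedupF]
  | cons t l' ih =>
    simp only [List.cons_append, pvDedupF]
    by_cases ht : t ∈ s
    · rw [if_pos ht, if_pos ht, ih]
    · rw [if_neg ht, if_neg ht, List.cons_append, ih (s ++ [t])]
      simp

lemma pvDedupF_filter_absorb (s s' l : List String) (hs : ∀ x ∈ s', x ∈ s) :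
    pvDedupF s (l.filter (fun t => t ∉ s')) = pvDedupF s l := by
  induction l generalizing s with
  | nil => rfl
  | cons t l' ih =>
    by_cases ht' : t ∈ s'
    · rw [List.filter_cons_of_neg (by simpa using ht'), pvDedupF, if_pos (hs t ht'), ih s hs]
    · rw [List.filter_cons_of_pos (by simpa using ht')]
      rw [pvDedupF, pvDedupF]
      by_cases ht : t ∈ s
      · rw [if_pos ht, if_pos ht, ih s hs]
      · rw [if_neg ht, if_neg ht,
          ih (s ++ [t]) (fun x hx => List.mem_append_left _ (hs x hx))]

lemma pvDedupF_nil_of_subset (s l : List String) (h : ∀ x ∈ l, x ∈ s) : pvDedupF s l = [] := by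
  induction l with
  | nil => rfl
  | cons t l' ih =>
    rw [pvDedupF, if_pos (h t List.mem_cons_self)]
    exact ih (fun x hx => h x (List.mem_cons_of_mem _ hx))

lemma mem_append_pvDedupF (s l : List String) (x : String) (hx : x ∈ l) :
    x ∈ s ++ pvDedupF s l := by
  induction l generalizing s with
  | nil => cases hx
  | cons t l' ih =>
    rw [pvDedupF]
    by_cases ht : t ∈ s
    · rw [if_pos ht]
      cases hx with
      | head => exact List.mem_append_left _ ht
      | tail _ hx => exact ih s hx
    · rw [if_neg ht]
      cases hx with
      | head => simp
      | tail _ hx =>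
        have := ih (s ++ [t]) hx
        rcases List.mem_append.1 this with h | h
        · rcases List.mem_append.1 h with h | h
          · exact List.mem_append_left _ h
          · simp at h; subst h; simp
        · refine List.mem_append_right _ ?_
          simp [h]

lemma pvDedupF_length_pos (s l : List String) (a : String) (ha : a ∈ l) (hns : a ∉ s) :
    1 ≤ (pvDedupF s l).length := by
  induction l generalizing s with
  | nil => cases ha
  | cons t l' ih =>
    rw [pvDedupF]
    by_cases ht : t ∈ s
    · rw [if_pos ht]
      cases ha with
      | head => exact absurd ht hns
      | tail _ ha => exact ih s ha hns
    · rw [if_neg ht]; simp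

lemma pvDedupF_flatMap_filter (adj : List (String × List String)) (s₀ : List String) :
    ∀ (l s : List String), (∀ x ∈ s₀, x ∈ s) →
    pvDedupF s (l.flatMap (fun n => (pvTgts adj n).filter (fun t => t ∉ s₀)))
      = pvDedupF s (l.flatMap (pvTgts adj)) := by
  intro l
  induction l with
  | nil => intro s _; rfl
  | cons c l' ih =>
    intro s hs
    rw [List.flatMap_cons, List.flatMap_cons, pvDedupF_append, pvDedupF_append,
      pvDedupF_filter_absorb s s₀ _ hs]
    congr 1
    exact ih _ (fun x hx => List.mem_append_left _ (hs x hx))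

-- The common scan function: seen list r, pending suffix w, processed one at a time.
-- Guards are totality bounds as in the ports.
def pvW (adj : List (String × List String)) (u : List String)
    (r w : List String)
    (hr : r.Nodup) (hru : ∀ x ∈ r, x ∈ u)
    (hadj : ∀ c, ∀ x ∈ pvTgts adj c, x ∈ u) : List String :=
  match w with
  | [] => r
  | c :: w' =>
    pvW adj u (r ++ pvDedupF r (pvTgts adj c)) (w' ++ pvDedupF r (pvTgts adj c))
      (nodup_append_pvDedupF r _ hr)
      (by intro x hx
          rcases List.mem_append.1 hx with hx | hx
          · exact hru x hx
          · exact hadj c x (mem_pvDedupF r _ x hx).1)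
      hadj
  termination_by (u.length + 1 - r.length) + w.length
  decreasing_by
    have hlen : (r ++ pvDedupF r (pvTgts adj c)).length ≤ u.length := by
      refine List.Subperm.length_le (List.subperm_of_subset (nodup_append_pvDedupF r _ hr) ?_)
      intro x hx
      rcases List.mem_append.1 hx with hx | hx
      · exact hru x hx
      · exact hadj c x (mem_pvDedupF r _ x hx).1
    rw [List.length_append] at hlen ⊢
    simp only [List.length_append, List.length_cons]
    omega

-- Guard proofs are irrelevant: equal state lists give equal runs.
lemma pvW_congr (adj : List (String × List String)) (u : List String)
    (r₁ r₂ w₁ w₂ : List String) (hs : r₁ = r₂) (hw : w₁ = w₂)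
    (hn₁ : r₁.Nodup) (hu₁ : ∀ x ∈ r₁, x ∈ u) (hn₂ : r₂.Nodup) (hu₂ : ∀ x ∈ r₂, x ∈ u)
    (hadj : ∀ c, ∀ x ∈ pvTgts adj c, x ∈ u) :
    pvW adj u r₁ w₁ hn₁ hu₁ hadj = pvW adj u r₂ w₂ hn₂ hu₂ hadj := by
  subst hs; subst hw; rfl

-- Processing a prefix chunk of the pending list in one bulk step.
lemma pvW_chunk (adj : List (String × List String)) (u : List String)
    (hadj : ∀ c, ∀ x ∈ pvTgts adj c, x ∈ u) :
    ∀ (x r y : List String) (hr : r.Nodup) (hru : ∀ z ∈ r, z ∈ u)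
      (h1 : (r ++ pvDedupF r (x.flatMap (pvTgts adj))).Nodup)
      (h2 : ∀ z ∈ r ++ pvDedupF r (x.flatMap (pvTgts adj)), z ∈ u),
    pvW adj u r (x ++ y) hr hru hadj
      = pvW adj u (r ++ pvDedupF r (x.flatMap (pvTgts adj)))
          (y ++ pvDedupF r (x.flatMap (pvTgts adj))) h1 h2 hadj := by
  intro x
  induction x with
  | nil =>
    intro r y hr hru h1 h2
    refine pvW_congr adj u _ _ _ _ ?_ ?_ _ _ _ _ hadj <;> simp [pvDedupF]
  | cons c x' ih =>
    intro r y hr hru h1 h2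
    rw [List.cons_append, pvW]
    rw [show (x' ++ y) ++ pvDedupF r (pvTgts adj c) = x' ++ (y ++ pvDedupF r (pvTgts adj c)) from by simp]
    have hd : pvDedupF r ((c :: x').flatMap (pvTgts adj))
        = pvDedupF r (pvTgts adj c)
          ++ pvDedupF (r ++ pvDedupF r (pvTgts adj c)) (x'.flatMap (pvTgts adj)) := by
      rw [List.flatMap_cons, pvDedupF_append]
    rw [ih (r ++ pvDedupF r (pvTgts adj c)) (y ++ pvDedupF r (pvTgts adj c)) _ _
      (by rw [hd, ← List.append_assoc] at h1; exact h1)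
      (by intro z hz; apply h2; rw [hd, ← List.append_assoc]; exact hz)]
    refine pvW_congr adj u _ _ _ _ ?_ ?_ _ _ _ _ hadj
    · rw [hd, List.append_assoc]
    · rw [hd, List.append_assoc]

-- If every pending node's targets are already seen, the scan is a no-op.
lemma pvW_noop (adj : List (String × List String)) (u : List String)
    (hadj : ∀ c, ∀ x ∈ pvTgts adj c, x ∈ u) :
    ∀ (w r : List String) (hall : ∀ c ∈ w, ∀ t ∈ pvTgts adj c, t ∈ r)
      (hr : r.Nodup) (hru : ∀ x ∈ r, x ∈ u),
    pvW adj u r w hr hru hadj = r := by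
  intro w
  induction w with
  | nil => intro r _ hr hru; rw [pvW]
  | cons c w' ih =>
    intro r hall hr hru
    rw [pvW]
    have hd : pvDedupF r (pvTgts adj c) = [] :=
      pvDedupF_nil_of_subset _ _ (hall c List.mem_cons_self)
    rw [pvW_congr adj u _ r _ w' (by rw [hd]; simp) (by rw [hd]; simp) _ _ hr hru hadj]
    exact ih r (fun c' hc' => hall c' (List.mem_cons_of_mem _ hc')) hr hru

-- A's queue loop equals the scan: A's state (r, q) corresponds to scan state
-- (r ++ pvDedupF r q) with pending pvDedupF r q.
lemma pvMainW (adj : List (String × List String)) (u : List String) (T : Nat)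
    (r q : List String)
    (hr : r.Nodup) (hru : ∀ x ∈ r, x ∈ u) (hqu : ∀ x ∈ q, x ∈ u)
    (hadj : ∀ c, ∀ x ∈ pvTgts adj c, x ∈ u)
    (hT : ∀ c, (pvTgts adj c).length ≤ T)
    (hn : (r ++ pvDedupF r q).Nodup) (hu2 : ∀ x ∈ r ++ pvDedupF r q, x ∈ u) :
    pvLoopA adj u T r q hr hru hqu hadj hT
      = pvW adj u (r ++ pvDedupF r q) (pvDedupF r q) hn hu2 hadj := by
  revert hn hu2
  fun_induction pvLoopA adj u T r q hr hru hqu hadj hT with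
  | case1 r hr hru hqu1 hqu2 =>
    intro hn hu2
    rw [pvW_congr adj u _ r _ [] (by simp [pvDedupF]) (by simp [pvDedupF]) _ _ hr hru hadj, pvW]
  | case2 r hr hru c q' hqu1 hc hqu2 ih =>
    intro hn0 hu20
    have hd : pvDedupF r (c :: q') = pvDedupF r q' := by rw [pvDedupF, if_pos hc]
    have hn : (r ++ pvDedupF r q').Nodup := by rw [← hd]; exact hn0
    have hu2 : ∀ x ∈ r ++ pvDedupF r q', x ∈ u := by rw [← hd]; exact hu20
    rw [ih hn hu2]
    exact pvW_congr adj u _ _ _ _ (by rw [hd]) (by rw [hd]) _ _ _ _ hadj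
  | case3 r hr hru c q' hqu1 hc hqu2 ih =>
    intro hn0 hu20
    have hd : pvDedupF r (c :: q') = c :: pvDedupF (r ++ [c]) q' := by
      rw [pvDedupF, if_neg hc]
    have horder : r ++ pvDedupF r (c :: q') = (r ++ [c]) ++ pvDedupF (r ++ [c]) q' := by
      rw [hd]; simp
    have hstate : pvDedupF (r ++ [c]) (pvEnq (r ++ [c]) q' (pvTgts adj c))
        = pvDedupF (r ++ [c]) q'
          ++ pvDedupF ((r ++ [c]) ++ pvDedupF (r ++ [c]) q') (pvTgts adj c) := by
      rw [pvEnq_eq, pvDedupF_append]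
      congr 1
      exact pvDedupF_filter_absorb _ _ (pvTgts adj c)
        (fun x hx => List.mem_append_left _ hx)
    have hn1 : ((r ++ [c]) ++ pvDedupF (r ++ [c]) q').Nodup := by
      have h1 : (r ++ c :: pvDedupF (r ++ [c]) q').Nodup := by rw [← hd]; exact hn0
      simpa using h1
    have hn' : ((r ++ [c]) ++ pvDedupF (r ++ [c]) (pvEnq (r ++ [c]) q' (pvTgts adj c))).Nodup := by
      rw [hstate, ← List.append_assoc]
      exact nodup_append_pvDedupF _ _ hn1
    have hu' : ∀ x ∈ (r ++ [c]) ++ pvDedupF (r ++ [c]) (pvEnq (r ++ [c]) q' (pvTgts adj c)), x ∈ u := by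
      intro x hx
      rcases List.mem_append.1 hx with h | h
      · rcases List.mem_append.1 h with h | h
        · exact hru x h
        · simp only [List.mem_singleton] at h; subst h; exact hqu1 x List.mem_cons_self
      · have hm := mem_pvDedupF _ _ x h
        rw [pvEnq_eq] at hm
        rcases List.mem_append.1 hm.1 with h2 | h2
        · exact hqu1 x (List.mem_cons_of_mem _ h2)
        · exact hadj c x (List.mem_of_mem_filter h2)
    rw [ih hn' hu']
    -- unfold one scan step on the RHS: it processes the pending head c
    have hstep :
        pvW adj u (r ++ pvDedupF r (c :: q')) (pvDedupF r (c :: q')) hn0 hu20 hadj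
          = pvW adj u ((r ++ [c]) ++ pvDedupF (r ++ [c]) q') (c :: pvDedupF (r ++ [c]) q')
              (by rw [← horder]; exact hn0) (by rw [← horder]; exact hu20) hadj :=
      pvW_congr adj u _ _ _ _ horder hd _ _ _ _ hadj
    rw [hstep, pvW]
    refine pvW_congr adj u _ _ _ _ ?_ ?_ _ _ _ _ hadj
    · rw [hstate, ← List.append_assoc]
    · rw [hstate]
-- B's fixed-point loop equals the scan, provided r splits into a processed prefix r₀
-- (all targets already in r) and the pending suffix w.
lemma pvRoundW (adj : List (String × List String)) (u : List String)
    (hadj : ∀ c, ∀ x ∈ pvTgts adj c, x ∈ u) :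
    ∀ (m : Nat) (r : List String) (hr : r.Nodup) (hru : ∀ x ∈ r, x ∈ u),
    u.length + 1 - r.length ≤ m →
    ∀ (r₀ w : List String), r = r₀ ++ w →
      (∀ n ∈ r₀, ∀ t ∈ pvTgts adj n, t ∈ r) →
    ∀ (hw1 : r.Nodup) (hw2 : ∀ x ∈ r, x ∈ u),
    pvLoopR adj u r hr hru hadj = pvW adj u r w hw1 hw2 hadj := by
  intro m
  induction m with
  | zero =>
    intro r hr hru hm
    exfalso
    have : r.length ≤ u.length := List.Subperm.length_le (List.subperm_of_subset hr hru)
    omega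
  | succ m ihm =>
    intro r hr hru hm r₀ w hsplit hproc hw1 hw2
    rw [pvLoopR]
    by_cases hnil : r.flatMap (fun node => (pvTgts adj node).filter (fun t => t ∉ r)) = []
    · rw [dif_pos hnil]
      have hall : ∀ n ∈ r, ∀ t ∈ pvTgts adj n, t ∈ r := by
        intro n hn t ht
        by_contra hnr
        have hmem : t ∈ (pvTgts adj n).filter (fun t => t ∉ r) :=
          List.mem_filter.2 ⟨ht, by simpa using hnr⟩
        rw [List.flatMap_eq_nil_iff.1 hnil n hn] at hmem
        cases hmem
      rw [pvW_noop adj u hadj w r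
        (fun c hc => hall c (by rw [hsplit]; exact List.mem_append_right _ hc)) hw1 hw2]
    · rw [dif_neg hnil]
      set additions := r.flatMap (fun node => (pvTgts adj node).filter (fun t => t ∉ r)) with hAdef
      -- additions comes from the pending suffix only
      have hproc_nil : r₀.flatMap (fun node => (pvTgts adj node).filter (fun t => t ∉ r)) = [] := by
        rw [List.flatMap_eq_nil_iff]
        intro n hn
        rw [List.filter_eq_nil_iff]
        intro t ht
        simpa using hproc n hn t ht
      have hadds : additions = w.flatMap (fun node => (pvTgts adj node).filter (fun t => t ∉ r)) := by
        have h1 := congrArg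
          (List.flatMap (fun node => (pvTgts adj node).filter (fun t => t ∉ r))) hsplit
        rw [List.flatMap_append] at h1
        rw [hAdef, h1, hproc_nil, List.nil_append]
      have hD : pvDedupF r additions = pvDedupF r (w.flatMap (pvTgts adj)) := by
        rw [hadds]
        exact pvDedupF_flatMap_filter adj r w r (fun x hx => hx)
      have hupd : PySem.Set.update r additions = r ++ pvDedupF r (w.flatMap (pvTgts adj)) := by
        rw [pvUpdate_eq, hD]
      have hnew_nodup : (PySem.Set.update r additions).Nodup := by
        rw [pvUpdate_eq]; exact nodup_append_pvDedupF r additions hr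
      have hnew_sub : ∀ x ∈ PySem.Set.update r additions, x ∈ u := by
        rw [pvUpdate_eq]
        intro x hx
        rcases List.mem_append.1 hx with hx | hx
        · exact hru x hx
        · rcases List.mem_flatMap.1 (mem_pvDedupF r additions x hx).1 with ⟨n, _, hn⟩
          exact hadj n x (List.mem_of_mem_filter hn)
      have hproc' : ∀ n ∈ r, ∀ t ∈ pvTgts adj n, t ∈ PySem.Set.update r additions := by
        intro n hn t ht
        rw [hupd]
        rcases List.mem_append.1 (hsplit ▸ hn) with hn0 | hnw
        · exact List.mem_append_left _ (hproc n hn0 t ht)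
        · exact mem_append_pvDedupF r _ t (List.mem_flatMap.2 ⟨n, hnw, ht⟩)
      have hmeas : u.length + 1 - (PySem.Set.update r additions).length ≤ m := by
        have h1 : (PySem.Set.update r additions).length ≤ u.length :=
          List.Subperm.length_le (List.subperm_of_subset hnew_nodup hnew_sub)
        have h2 : r.length + 1 ≤ (PySem.Set.update r additions).length := by
          obtain ⟨a, hmem⟩ := List.exists_mem_of_ne_nil additions hnil
          have ha : a ∉ r := by
            rw [hAdef] at hmem
            rcases List.mem_flatMap.1 hmem with ⟨n, _, hn⟩
            simpa using (List.of_mem_filter hn)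
          have hgrow : 1 ≤ (pvDedupF r additions).length :=
            pvDedupF_length_pos r additions a hmem ha
          rw [pvUpdate_eq, List.length_append]
          omega
        omega
      rw [ihm (PySem.Set.update r additions) hnew_nodup hnew_sub hmeas r
        (pvDedupF r (w.flatMap (pvTgts adj))) hupd hproc' hnew_nodup hnew_sub]
      -- the scan from (r, w) reaches the same state by the chunk lemma
      rw [pvW_congr adj u r r w (w ++ []) rfl (List.append_nil w).symm hw1 hw2 hw1 hw2 hadj]
      rw [pvW_chunk adj u hadj w r [] hw1 hw2
        (by rw [hupd] at hnew_nodup; exact hnew_nodup)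
        (by rw [hupd] at hnew_sub; exact hnew_sub)]
      refine pvW_congr adj u _ _ _ _ ?_ ?_ _ _ _ _ hadj
      · exact hupd
      · simp

-- ===== VERDICT =====
theorem compute_navigation_reachability_py_spec : Claim_equal_compute_navigation_reachability_py := by
  intro root adj _
  show compute_navigation_reachability_py root adj = compute_navigation_reachability_py_alt root adj
  rw [compute_navigation_reachability_py, compute_navigation_reachability_py_alt]
  have hroot : ∀ x ∈ [root], x ∈ pvUniv root adj := by
    intro x hx; simp at hx; subst hx; exact List.mem_cons_self
  have hd : pvDedupF [] [root] = [root] := by simp [pvDedupF]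
  rw [pvMainW adj (pvUniv root adj) _ [] [root] List.nodup_nil (by simp) hroot
    (pvTgts_mem_univ root adj) (pvTgts_len_le adj)
    (by rw [List.nil_append, hd]; exact List.nodup_singleton _)
    (by intro x hx; rw [List.nil_append, hd] at hx; exact hroot x hx)]
  rw [pvRoundW adj (pvUniv root adj) (pvTgts_mem_univ root adj)
    ((pvUniv root adj).length + 1) [root]
    (List.nodup_singleton _) hroot (by simp) [] [root] (by simp) (by intro n hn; cases hn)
    (List.nodup_singleton _) hroot]
  exact pvW_congr adj (pvUniv root adj) _ _ _ _ (by rw [List.nil_append, hd]) (by rw [hd])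
    _ _ _ _ (pvTgts_mem_univ root adj)
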